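-- pv_equiv track=rewrite | github.com/Misha-blue/TA | Диплом/Plasmid/Исключение плазмид.py | func
-- ===== SOURCE A (Python) =====
-- def func(a):
--     s  = ""
--     for i in range(len(a)):
--         if a[i] == " ":
--             j = i+2
--             while a[j] != '"':
--                 s = s + a[j]
--                 j +=1
--     return(s)
-- ===== SOURCE B (Python) =====
-- def func(a):
--     n = len(a)
--     nextq = [n] * (n + 2)
--     for p in range(n - 1, -1, -1):
--         nextq[p] = p if a[p] == '"' else nextq[p + 1]
--     parts = []
--     for i, c in enumerate(a):
--         if c == " ":
--             parts.append(a[i + 2 : nextq[i + 2]])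
--     return "".join(parts)
-- ===== Notes on version B (the rewrite author's own statement) =====
-- stated objective: alternative
-- what changed: B precomputes a next-quote index table in one backward pass and then emits one slice per space, instead of A's per-space forward character-by-character rescan with string concatenation.
import Mathlib
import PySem

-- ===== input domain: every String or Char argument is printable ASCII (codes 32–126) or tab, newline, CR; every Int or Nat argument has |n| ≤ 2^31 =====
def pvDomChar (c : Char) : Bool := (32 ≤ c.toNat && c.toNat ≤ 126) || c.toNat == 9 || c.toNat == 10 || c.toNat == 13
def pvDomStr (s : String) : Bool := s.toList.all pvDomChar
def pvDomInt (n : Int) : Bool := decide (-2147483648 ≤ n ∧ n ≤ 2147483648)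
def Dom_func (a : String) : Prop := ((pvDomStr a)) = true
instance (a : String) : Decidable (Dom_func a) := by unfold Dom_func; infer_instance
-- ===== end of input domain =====

-- B replaces A's per-space forward rescan (char-by-char concatenation) by one backward
-- next-quote-table pass plus one slice per space; equivalence is claimed on inputs where
-- the Python A returns (every space is eventually followed, from two positions later, by a '"').

-- ===== PORT A =====
-- inner while loop: collect a[j], a[j+1], … until '"'.  Where Python raises IndexError
-- (j runs past the end) the port stops and returns s; those inputs are outside Pre_func.
def funcInner (l : List Char) (j : Nat) (s : List Char) : List Char :=
  if h : j < l.length then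
    if l[j] = '"' then s
    else funcInner l (j + 1) (s ++ [l[j]])
  else s
termination_by l.length - j

def func (a : String) : String :=
  String.ofList ((List.range a.toList.length).foldl
    (fun s i => if a.toList[i]? = some ' ' then funcInner a.toList (i + 2) s else s) [])

-- ===== PORT B =====
-- backward pass of Source B: nextq[p] = p if a[p] == '"' else nextq[p+1]; entries past the
-- end of the string are the sentinel n (Source B pads the table with n), so getD _ n is exact.
def buildNextQ (n : Nat) : List Char → Nat → List Nat
  | [], _ => []
  | c :: rest, p =>
    let r := buildNextQ n rest (p + 1)
    (if c = '"' then p else r.headD n) :: r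

def func_alt (a : String) : String :=
  let l := a.toList
  let n := l.length
  let nextq := buildNextQ n l 0
  let parts := (PySem.List.enumerate l 0).foldl
    (fun ps ic =>
      if ic.2 = ' ' then
        ps ++ [PySem.List.slice l (some (ic.1 + 2))
                (some ((nextq.getD (ic.1 + 2).toNat n : Nat) : Int))]
      else ps) []
  String.ofList parts.flatten

-- ===== PRECONDITION & SPEC =====
-- Pre_: exactly the inputs Python A returns on — every space must be followed (at some
-- index ≥ i+2) by a '"'; otherwise A's inner while loop raises IndexError.
def Pre_func (a : String) : Prop :=
  ∀ i ∈ List.range a.toList.length, a.toList[i]? = some ' ' →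
    ∃ k ∈ List.range a.toList.length, i + 2 ≤ k ∧ a.toList[k]? = some '"'
instance (a : String) : Decidable (Pre_func a) := by unfold Pre_func; infer_instance

def pvWitness_func : String := " a\""

def Spec_func (a : String) (out : String) : Prop := out = func_alt a
instance (a : String) (out : String) : Decidable (Spec_func a out) := by unfold Spec_func; infer_instance

-- ===== CLAIM (what is proved, stated in full; the proofs are below) =====
def Claim_equal_func : Prop := ∀ (a : String), Dom_func a → Pre_func a → Spec_func a (func a)

-- ===== LEMMAS AND PROOFS =====

-- first quote index ≥ j (l.length if none)
def fq (l : List Char) (j : Nat) : Nat :=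
  if h : j < l.length then (if l[j] = '"' then j else fq l (j + 1)) else l.length
termination_by l.length - j

-- the characters A's inner loop collects starting at j
def seg (l : List Char) (j : Nat) : List Char := (l.drop j).take (fq l j - j)

theorem fq_ge (l : List Char) (j : Nat) (h : j ≤ l.length) : j ≤ fq l j := by
  fun_induction fq l j with
  | case1 j hlt hq => exact Nat.le_refl _
  | case2 j hlt hq ih => exact Nat.le_trans (Nat.le_succ _) (ih (by omega))
  | case3 j hlt => omega

theorem seg_end (l : List Char) (j : Nat) (h : ¬ j < l.length) : seg l j = [] := by
  unfold seg fq
  rw [dif_neg h]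
  simp [List.drop_eq_nil_of_le (by omega : l.length ≤ j)]

theorem seg_stop (l : List Char) (j : Nat) (h : j < l.length) (hq : l[j] = '"') :
    seg l j = [] := by
  unfold seg fq
  rw [dif_pos h, if_pos hq]
  simp

theorem seg_cons (l : List Char) (j : Nat) (h : j < l.length) (hq : ¬ l[j] = '"') :
    seg l j = l[j] :: seg l (j + 1) := by
  have hfq : fq l j = fq l (j + 1) := by
    rw [fq, dif_pos h, if_neg hq]
  have hge : j + 1 ≤ fq l (j + 1) := fq_ge l (j + 1) (by omega)
  unfold seg
  rw [hfq, List.drop_eq_getElem_cons h]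
  have : fq l (j + 1) - j = (fq l (j + 1) - (j + 1)) + 1 := by omega
  rw [this, List.take_succ_cons]

theorem funcInner_eq_seg (l : List Char) (j : Nat) (s : List Char) :
    funcInner l j s = s ++ seg l j := by
  fun_induction funcInner l j s with
  | case1 j s hlt hq => rw [seg_stop l _ hlt hq]; simp
  | case2 j s hlt hq ih => rw [ih, seg_cons l _ hlt hq]; simp
  | case3 j s hlt => rw [seg_end l _ hlt]; simp

theorem fq_end (l : List Char) (j : Nat) (h : ¬ j < l.length) : fq l j = l.length := by
  rw [fq, dif_neg h]

theorem bn_getD (l : List Char) : ∀ (rest : List Char) (t : Nat), rest = l.drop t →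
    ∀ k, (buildNextQ l.length rest t).getD k l.length = fq l (t + k) := by
  intro rest
  induction rest with
  | nil =>
    intro t h k
    have hlen : l.length ≤ t := by
      by_contra hc
      have := List.drop_eq_nil_iff.mp h.symm
      omega
    simp only [buildNextQ, List.getD_nil]
    rw [fq_end l (t + k) (by omega)]
  | cons c r ih =>
    intro t h k
    have ht : t < l.length := by
      by_contra hc
      rw [List.drop_eq_nil_of_le (by omega)] at h
      simp at h
    have hget? : l[t]? = some c := by
      have h0 : (l.drop t)[0]? = some c := by rw [← h]; rfl
      rw [List.getElem?_drop] at h0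
      simpa using h0
    have hget : l[t] = c := by
      have := List.getElem?_eq_getElem ht
      rw [this] at hget?
      exact Option.some.inj hget?
    have hr : r = l.drop (t + 1) := by
      have := congrArg List.tail h
      simpa [List.tail_drop] using this
    cases k with
    | zero =>
      simp only [buildNextQ, List.getD_cons_zero, Nat.add_zero]
      rw [fq, dif_pos ht, hget]
      by_cases hq : c = '"'
      · rw [if_pos hq, if_pos hq]
      · rw [if_neg hq, if_neg hq]
        have h1 := ih (t + 1) hr 0
        cases hbn : buildNextQ l.length r (t + 1) with
        | nil => rw [hbn] at h1; simpa using h1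
        | cons x xs => rw [hbn] at h1; simpa using h1
    | succ k =>
      simp only [buildNextQ, List.getD_cons_succ]
      rw [ih (t + 1) hr k]
      congr 1
      omega

theorem foldA (l : List Char) : ∀ (idxs : List Nat) (s : List Char),
    idxs.foldl (fun s i => if l[i]? = some ' ' then funcInner l (i + 2) s else s) s
      = s ++ idxs.flatMap (fun i => if l[i]? = some ' ' then seg l (i + 2) else []) := by
  intro idxs
  induction idxs with
  | nil => intro s; simp
  | cons i t ih =>
    intro s
    simp only [List.foldl_cons, List.flatMap_cons]
    by_cases h : l[i]? = some ' '
    · rw [if_pos h, if_pos h, ih, funcInner_eq_seg]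
      simp
    · rw [if_neg h, if_neg h, ih]
      simp

theorem foldB (g : Int × Char → List Char) : ∀ (es : List (Int × Char)) (ps : List (List Char)),
    (es.foldl (fun ps ic => if ic.2 = ' ' then ps ++ [g ic] else ps) ps).flatten
      = ps.flatten ++ es.flatMap (fun ic => if ic.2 = ' ' then g ic else []) := by
  intro es
  induction es with
  | nil => intro ps; simp
  | cons ic t ih =>
    intro ps
    simp only [List.foldl_cons, List.flatMap_cons]
    by_cases h : ic.2 = ' '
    · rw [if_pos h, if_pos h, ih]
      simp
    · rw [if_neg h, if_neg h, ih]
      simp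

theorem bridge (g : Int → List Char) : ∀ (sub : List Char) (t : Nat),
    (PySem.List.enumerate sub (t : Int)).flatMap (fun ic => if ic.2 = ' ' then g ic.1 else [])
      = (List.range sub.length).flatMap
          (fun i => if sub[i]? = some ' ' then g ((t + i : Nat) : Int) else []) := by
  intro sub
  induction sub with
  | nil => intro t; simp [PySem.List.enumerate]
  | cons c r ih =>
    intro t
    rw [PySem.List.enumerate_cons]
    simp only [List.flatMap_cons]
    have h1 : ((t : Int) + 1) = ((t + 1 : Nat) : Int) := by push_cast; ring
    rw [h1, ih]
    rw [List.length_cons, List.range_succ_eq_map]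
    simp only [List.flatMap_cons, List.flatMap_map, List.getElem?_cons_zero,
      List.getElem?_cons_succ, Option.some.injEq, Nat.cast_add, Nat.cast_one]
    congr 1
    congr 1
    funext i
    simp only [Nat.succ_eq_add_one, Nat.cast_add, Nat.cast_one]
    have h2 : (t : Int) + 1 + (i : Int) = (t : Int) + ((i : Int) + 1) := by ring
    rw [h2]

theorem bn_getD0 (l : List Char) (k : Nat) :
    (buildNextQ l.length l 0).getD k l.length = fq l k := by
  have := bn_getD l l 0 (by simp) k
  simpa using this

theorem func_spec : Claim_equal_func := by
  intro a _dom _pre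
  show func a = func_alt a
  unfold func func_alt
  simp only [foldA, foldB]
  have h0 : (0 : Int) = ((0 : Nat) : Int) := by norm_num
  rw [h0]
  rw [bridge (fun x : Int => PySem.List.slice a.toList (some (x + 2))
      (some (((buildNextQ a.toList.length a.toList 0).getD (x + 2).toNat a.toList.length : Nat) : Int)))]
  refine congrArg String.ofList ?_
  simp only [List.nil_append, List.flatten_nil]
  congr 1
  funext i
  by_cases h : a.toList[i]? = some ' '
  · rw [if_pos h, if_pos h]
    have hcast : (((0 + i : Nat) : Int) + 2) = ((i + 2 : Nat) : Int) := by push_cast; ring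
    rw [hcast]
    rw [Int.toNat_natCast]
    rw [bn_getD0]
    rw [PySem.List.slice_natCast]
    rfl
  · rw [if_neg h, if_neg h]
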